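-- pv_equiv track=rewrite | github.com/allabeb92-creator/hpa4d-bot | main.py | smart_filter_biji
-- ===== SOURCE A (Python) =====
-- def digital_root(number):
--     n = sum(int(d) for d in str(number).zfill(4))
--     while n >= 10:
--         n = sum(int(d) for d in str(n))
--     return n
--
-- def smart_filter_biji(numbers, prev_num):
--     if not numbers or prev_num is None:
--         return numbers
--     prev_dr = digital_root(prev_num)
--     is_prev_odd = prev_dr % 2 != 0
--     priority = []
--     secondary = []
--     for n in numbers:
--         n_int = int(n) if isinstance(n, str) else n
--         curr_dr = digital_root(n_int)
--         is_curr_odd = curr_dr % 2 != 0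
--         if is_prev_odd != is_curr_odd:
--             priority.append(n)
--         else:
--             secondary.append(n)
--     return priority + secondary
-- ===== SOURCE B (Python) =====
-- def digital_root(number):
--     n = sum(int(d) for d in str(number).zfill(4))
--     while n >= 10:
--         n = sum(int(d) for d in str(n))
--     return n
--
-- def smart_filter_biji(numbers, prev_num):
--     # Same guard and digital_root as A; the two-bucket pass is replaced by one
--     # stable sort with a binary key (parity-differs first).
--     if not numbers or prev_num is None:
--         return numbers
--     is_prev_odd = digital_root(prev_num) % 2 != 0
--     def key(n):
--         n_int = int(n) if isinstance(n, str) else n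
--         return 0 if is_prev_odd != (digital_root(n_int) % 2 != 0) else 1
--     return sorted(numbers, key=key)
-- ===== Notes on version B (the rewrite author's own statement) =====
-- stated objective: idiomatic
-- what changed: The explicit two-list bucket-and-concatenate loop is replaced by a single stable sort with a binary key (0 for parity-differs, 1 for same), relying on sort stability to preserve order within each group.
import Mathlib
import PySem

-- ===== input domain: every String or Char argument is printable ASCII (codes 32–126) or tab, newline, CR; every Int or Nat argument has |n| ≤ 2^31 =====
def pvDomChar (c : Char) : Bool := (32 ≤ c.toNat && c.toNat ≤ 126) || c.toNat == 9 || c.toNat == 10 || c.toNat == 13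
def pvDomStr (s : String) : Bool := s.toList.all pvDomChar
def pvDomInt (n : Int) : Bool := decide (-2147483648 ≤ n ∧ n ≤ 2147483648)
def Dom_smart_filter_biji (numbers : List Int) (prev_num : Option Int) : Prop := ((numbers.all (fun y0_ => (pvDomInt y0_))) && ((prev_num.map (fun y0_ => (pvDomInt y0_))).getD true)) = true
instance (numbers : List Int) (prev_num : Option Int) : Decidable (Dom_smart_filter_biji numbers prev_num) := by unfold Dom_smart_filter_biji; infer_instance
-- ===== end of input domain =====

-- B replaces A's two-bucket partition loop by one stable sort with a binary key; equal output proved on Pre_.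

-- ===== PORT A =====
-- helper digital_root appears verbatim in BOTH Source A and Source B; it is ported once and used by both ports.
-- one pass of 'n = sum(int(d) for d in str(n))'; int(d) via ofChars? with getD 0, exact for digit
-- characters (Pre_ excludes negative inputs, where Python's int('-') raises ValueError).
def pvDigitSum (n : Int) : Int :=
  ((PySem.Int.toChars n).map (fun d => (PySem.Int.ofChars? [d]).getD 0)).sum

-- 'while n >= 10: n = sum(int(d) for d in str(n))' with fuel; fuel n.toNat bounds the iteration
-- count since the loop state strictly decreases while n ≥ 10.
def pvDrWhile : Nat → Int → Int
  | 0, n => n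
  | fuel + 1, n => if 10 ≤ n then pvDrWhile fuel (pvDigitSum n) else n

def digital_root (number : Int) : Int :=
  -- n = sum(int(d) for d in str(number).zfill(4))
  let n := ((PySem.Chars.zfill (PySem.Int.toChars number) 4).map (fun d => (PySem.Int.ofChars? [d]).getD 0)).sum
  pvDrWhile n.toNat n

def smart_filter_biji (numbers : List Int) (prev_num : Option Int) : List Int :=
  if numbers = [] then numbers else
  match prev_num with
  | none => numbers
  | some pv =>
    let prev_dr := digital_root pv
    let is_prev_odd := PySem.Int.mod prev_dr 2 != 0
    let res := numbers.foldl (fun (acc : List Int × List Int) n =>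
      -- n_int = int(n) if isinstance(n, str) else n: elements are ints here, so n_int = n
      let curr_dr := digital_root n
      let is_curr_odd := PySem.Int.mod curr_dr 2 != 0
      if is_prev_odd != is_curr_odd then (acc.1 ++ [n], acc.2) else (acc.1, acc.2 ++ [n]))
      ([], [])
    res.1 ++ res.2

-- ===== PORT B =====
def smart_filter_biji_alt (numbers : List Int) (prev_num : Option Int) : List Int :=
  if numbers = [] then numbers else
  match prev_num with
  | none => numbers
  | some pv =>
    let is_prev_odd := PySem.Int.mod (digital_root pv) 2 != 0
    PySem.List.sorted numbers
      (fun n => if is_prev_odd != (PySem.Int.mod (digital_root n) 2 != 0) then (0 : Int) else 1)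

-- ===== PRECONDITION & SPEC =====
-- Pre_ excludes negative numbers reaching digital_root (nonempty list with some prev_num):
-- there str(number).zfill(4) contains '-' and Python's int('-') raises ValueError in A (and in B).
def Pre_smart_filter_biji (numbers : List Int) (prev_num : Option Int) : Prop :=
  numbers = [] ∨ prev_num = none ∨ (0 ≤ prev_num.getD 0 ∧ ∀ n ∈ numbers, 0 ≤ n)
instance (numbers : List Int) (prev_num : Option Int) : Decidable (Pre_smart_filter_biji numbers prev_num) := by unfold Pre_smart_filter_biji; infer_instance

def pvWitness_smart_filter_biji : List Int × Option Int := ([3, 4, 5, 9, 18, 2], some 7)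

def Spec_smart_filter_biji (numbers : List Int) (prev_num : Option Int) (out : List Int) : Prop := out = smart_filter_biji_alt numbers prev_num
instance (numbers : List Int) (prev_num : Option Int) (out : List Int) : Decidable (Spec_smart_filter_biji numbers prev_num out) := by unfold Spec_smart_filter_biji; infer_instance

-- ===== CLAIM (what is proved, stated in full; the proofs are below) =====
def Claim_equal_smart_filter_biji : Prop := ∀ (numbers : List Int) (prev_num : Option Int), Dom_smart_filter_biji numbers prev_num → Pre_smart_filter_biji numbers prev_num → Spec_smart_filter_biji numbers prev_num (smart_filter_biji numbers prev_num)

-- ===== LEMMAS AND PROOFS =====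

-- inserting x between a prefix it does not go before and a suffix it goes before
theorem pv_insertBy_split {α : Type} (before : α → α → Bool) (x : α) (f0 f1 : List α)
    (h0 : ∀ y ∈ f0, before x y = false) (h1 : ∀ y ∈ f1, before x y = true) :
    PySem.List.insertBy before x (f0 ++ f1) = f0 ++ x :: f1 := by
  induction f0 with
  | nil =>
    cases f1 with
    | nil => rfl
    | cons y ys => simp [PySem.List.insertBy, h1 y (by simp)]
  | cons z zs ih =>
    simp only [List.cons_append, PySem.List.insertBy, h0 z (by simp)]
    simp only [Bool.false_eq_true, if_false, List.cons.injEq, true_and]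
    exact ih (fun y hy => h0 y (by simp [hy]))

-- a stable sort by a binary 0/1 key is exactly the partition: key-0 elements first, each
-- group in original order
theorem pv_sorted_binary_key {α : Type} (c : α → Bool) (xs : List α) :
    PySem.List.sorted xs (fun x => if c x then (0 : Int) else 1)
      = xs.filter c ++ xs.filter (fun x => !c x) := by
  rw [PySem.List.sorted_eq_foldl_insertBy]
  have main : ∀ (l p : List α),
      List.foldl (fun acc x => PySem.List.insertBy
          (fun a b => decide ((if c a then (0:Int) else 1) < (if c b then (0:Int) else 1))) x acc)
        (p.filter c ++ p.filter (fun x => !c x)) l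
      = (p ++ l).filter c ++ (p ++ l).filter (fun x => !c x) := by
    intro l
    induction l with
    | nil => intro p; simp
    | cons x xs ih =>
      intro p
      have hstep : PySem.List.insertBy
          (fun a b => decide ((if c a then (0:Int) else 1) < (if c b then (0:Int) else 1))) x
          (p.filter c ++ p.filter (fun x => !c x))
          = (p ++ [x]).filter c ++ (p ++ [x]).filter (fun x => !c x) := by
        cases hc : c x with
        | true =>
          rw [pv_insertBy_split _ x (p.filter c) (p.filter (fun x => !c x))
            (by intro y hy
                have : c y = true := (List.mem_filter.mp hy).2
                simp [hc, this])
            (by intro y hy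
                have : (!c y) = true := (List.mem_filter.mp hy).2
                have hcy : c y = false := by cases h : c y <;> simp [h] at this ⊢
                simp [hc, hcy])]
          simp [List.filter_append, hc]
        | false =>
          rw [PySem.List.insertBy_of_forall_not_before _ x _
            (by intro y hy
                rcases List.mem_append.mp hy with h | h
                · have : c y = true := (List.mem_filter.mp h).2
                  simp [hc, this]
                · have : (!c y) = true := (List.mem_filter.mp h).2
                  have hcy : c y = false := by cases h' : c y <;> simp [h'] at this ⊢
                  simp [hc, hcy])]
          simp [List.filter_append, hc]
      simpa [hstep, List.append_assoc] using ih (p ++ [x])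
  simpa using main xs []

-- A's pair-accumulating foldl computes the two filters
theorem pv_foldl_pair_filter {α : Type} (c : α → Bool) (l : List α) :
    List.foldl (fun (acc : List α × List α) n =>
        if c n then (acc.1 ++ [n], acc.2) else (acc.1, acc.2 ++ [n])) ([], []) l
      = (l.filter c, l.filter (fun x => !c x)) := by
  have hfun : (fun (acc : List α × List α) n =>
      if c n then (acc.1 ++ [n], acc.2) else (acc.1, acc.2 ++ [n]))
      = (fun (acc : List α × List α) n =>
        ((fun a m => if c m then a ++ [m] else a) acc.1 n,
         (fun b m => if c m then b else b ++ [m]) acc.2 n)) := by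
    funext acc n; cases h : c n <;> simp [h]
  rw [hfun, PySem.List.foldl_prod_mk (fun a m => if c m then a ++ [m] else a)
      (fun b m => if c m then b else b ++ [m]) l [] [], Prod.mk.injEq]
  constructor
  · simpa using PySem.List.foldl_append_if_eq_filter c l []
  · have hfun2 : (fun (b : List α) m => if c m then b else b ++ [m])
        = (fun (b : List α) m => if (!c m) then b ++ [m] else b) := by
      funext b m; cases h : c m <;> rfl
    rw [hfun2]
    simpa using PySem.List.foldl_append_if_eq_filter (fun x => !c x) l []

-- ===== VERDICT (by name: the statement is the Claim_ definition above) =====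
theorem smart_filter_biji_spec : Claim_equal_smart_filter_biji := by
  intro numbers prev_num _ _
  unfold Spec_smart_filter_biji smart_filter_biji smart_filter_biji_alt
  by_cases hn : numbers = []
  · simp [hn]
  · simp only [hn, if_false]
    cases prev_num with
    | none => rfl
    | some pv =>
      simp only
      rw [pv_foldl_pair_filter
        (fun n => (PySem.Int.mod (digital_root pv) 2 != 0) != (PySem.Int.mod (digital_root n) 2 != 0)) numbers]
      rw [pv_sorted_binary_key
        (fun n => (PySem.Int.mod (digital_root pv) 2 != 0) != (PySem.Int.mod (digital_root n) 2 != 0)) numbers]
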